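-- pv_equiv track=rewrite | github.com/DominikMat/string-art-robot | src/string_visualizer.py | pattern_progressive_spiral
-- ===== SOURCE A (Python) =====
-- NUM_PINS = 32           # Liczba gwoździ na okręgu
--
-- def pattern_progressive_spiral(start_jump=1, step_increase=1):
--     """9. Spirala Progresywna: Zwiększa 'skip' o stałą wartość w każdym kroku."""
--     sequence = [0]
--     current = 0
--     jump = start_jump
--     for i in range(NUM_PINS * 4): # Dłuższa pętla dla lepszej spirali
--         current = (current + jump) % NUM_PINS
--         sequence.append(current)
--         jump += step_increase
--         if current == sequence[0] and i > NUM_PINS: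
--             break
--     return sequence
-- ===== SOURCE B (Python) =====
-- NUM_PINS = 32
--
--
-- def pattern_progressive_spiral(start_jump=1, step_increase=1):
--     """Two-phase: first materialize all candidate pins via the closed-form
--     arithmetic-series partial sum, then cut the list at the break point."""
--     vals = [((i + 1) * start_jump + step_increase * (i * (i + 1) // 2)) % NUM_PINS
--             for i in range(NUM_PINS * 4)]
--     for i, v in enumerate(vals):
--         if v == 0 and i > NUM_PINS:
--             return [0] + vals[:i + 1]
--     return [0] + vals
-- ===== Notes on version B (the rewrite author's own statement) =====
-- stated objective: alternative
-- what changed: Replaces the single loop with running current/jump accumulators by a two-phase computation: materialize all candidate values with the closed-form arithmetic-series partial sum ((i+1)*start_jump + step_increase*i*(i+1)//2) % NUM_PINS, then truncate at the first qualifying zero.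
import Mathlib
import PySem

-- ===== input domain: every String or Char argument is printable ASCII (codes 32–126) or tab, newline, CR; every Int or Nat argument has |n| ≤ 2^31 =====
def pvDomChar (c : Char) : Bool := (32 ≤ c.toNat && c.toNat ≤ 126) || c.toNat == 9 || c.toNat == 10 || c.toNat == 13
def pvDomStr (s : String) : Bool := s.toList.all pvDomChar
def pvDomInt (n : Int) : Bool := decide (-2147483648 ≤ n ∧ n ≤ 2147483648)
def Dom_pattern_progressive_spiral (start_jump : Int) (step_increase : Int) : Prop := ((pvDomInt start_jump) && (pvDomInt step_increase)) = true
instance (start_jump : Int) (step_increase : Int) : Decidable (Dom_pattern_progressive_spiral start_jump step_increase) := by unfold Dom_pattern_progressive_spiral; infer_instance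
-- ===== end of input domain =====

-- B replaces A's single loop with running current/jump accumulators by a two-phase
-- computation: materialize all closed-form candidate values, then cut at the break
-- point (objective: alternative).

-- ===== PORT A =====
-- for i in range(NUM_PINS*4) with break: fuel counts remaining iterations, i is the Python index
def spiralLoopA (si : Int) : Nat → Int → List Int → Int → Int → List Int
  | 0, _, seq, _, _ => seq
  | n+1, i, seq, current, jump =>
    let current' := PySem.Int.mod (current + jump) 32
    let seq' := seq ++ [current']
    let jump' := jump + si
    -- sequence[0]: sequence is nonempty throughout, so Python's sequence[0] is headI
    if current' = seq'.headI ∧ i > 32 then seq'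
    else spiralLoopA si n (i+1) seq' current' jump'

def pattern_progressive_spiral (start_jump : Int) (step_increase : Int) : List Int :=
  spiralLoopA step_increase 128 0 [0] 0 start_jump

-- ===== PORT B =====
-- the closed-form value appended at index i: ((i+1)*sj + si*(i*(i+1)//2)) % 32
def pvCF (sj si i : Int) : Int :=
  PySem.Int.mod ((i+1)*sj + si * (PySem.Int.floordiv (i*(i+1)) 2)) 32

-- the 'for i, v in enumerate(vals): … return [0] + vals[:i+1]' scan of Source B:
-- keeps the prefix up to and including the first v == 0 with i > 32
def pvCut : Int → List Int → List Int
  | _, [] => []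
  | i, v :: rest => if v = 0 ∧ i > 32 then [v] else v :: pvCut (i+1) rest

def pattern_progressive_spiral_alt (start_jump : Int) (step_increase : Int) : List Int :=
  let vals := (PySem.List.pyRange 0 128 1).map (pvCF start_jump step_increase)
  0 :: pvCut 0 vals

-- ===== PRECONDITION & SPEC =====
def Spec_pattern_progressive_spiral (start_jump : Int) (step_increase : Int) (out : List Int) : Prop := out = pattern_progressive_spiral_alt start_jump step_increase
instance (start_jump : Int) (step_increase : Int) (out : List Int) : Decidable (Spec_pattern_progressive_spiral start_jump step_increase out) := by unfold Spec_pattern_progressive_spiral; infer_instance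

-- ===== CLAIM (what is proved, stated in full; the proofs are below) =====
def Claim_equal_pattern_progressive_spiral : Prop := ∀ (start_jump : Int) (step_increase : Int), Dom_pattern_progressive_spiral start_jump step_increase → Spec_pattern_progressive_spiral start_jump step_increase (pattern_progressive_spiral start_jump step_increase)

-- ===== LEMMAS AND PROOFS =====

lemma headI_append_ne {l : List Int} (x : Int) (h : l ≠ []) : (l ++ [x]).headI = l.headI := by
  cases l with
  | nil => exact absurd rfl h
  | cons a t => rfl

lemma floordiv_step (i : Int) :
    PySem.Int.floordiv (i*(i+1)) 2 = PySem.Int.floordiv ((i-1)*i) 2 + i := by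
  rw [PySem.Int.floordiv_eq_ediv_of_pos (by norm_num), PySem.Int.floordiv_eq_ediv_of_pos (by norm_num)]
  have h : i*(i+1) = (i-1)*i + 2*i := by ring
  have he : ((i-1)*i) % 2 = 0 := by
    have := Int.even_mul_succ_self (i-1)
    simpa [Int.even_iff, show (i-1)+1 = i by ring] using this
  rw [h]
  generalize (i-1)*i = p at he ⊢
  omega

-- the values pvCF sj si at indices i, i+1, …, i+n-1
def pvValsFrom (sj si : Int) : Int → Nat → List Int
  | _, 0 => []
  | i, n+1 => pvCF sj si i :: pvValsFrom sj si (i+1) n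

lemma valsFrom_eq_map_pyRange (sj si : Int) : ∀ (n : Nat) (i : Int),
    pvValsFrom sj si i n = (PySem.List.pyRange i (i + n) 1).map (pvCF sj si) := by
  intro n
  induction n with
  | zero => intro i; simp [pvValsFrom]
  | succ n ih =>
    intro i
    rw [PySem.List.pyRange_one_cons (by omega)]
    simp only [List.map_cons, pvValsFrom, ih (i+1)]
    norm_num
    ring_nf

lemma loop_eq_cut (sj si : Int) : ∀ (n : Nat) (i : Int) (seq : List Int),
    seq.headI = 0 → seq ≠ [] →
    spiralLoopA si n i seq
      (PySem.Int.mod (i*sj + si * (PySem.Int.floordiv ((i-1)*i) 2)) 32) (sj + i*si)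
    = seq ++ pvCut i (pvValsFrom sj si i n) := by
  intro n
  induction n with
  | zero => intro i seq _ _; simp [spiralLoopA, pvValsFrom, pvCut]
  | succ n ih =>
    intro i seq h0 hne
    have hmod : PySem.Int.mod (PySem.Int.mod (i*sj + si * (PySem.Int.floordiv ((i-1)*i) 2)) 32 + (sj + i*si)) 32
        = pvCF sj si i := by
      unfold pvCF
      rw [PySem.Int.mod_eq_emod_of_pos (by norm_num), PySem.Int.mod_eq_emod_of_pos (by norm_num),
          PySem.Int.mod_eq_emod_of_pos (by norm_num), Int.emod_add_emod, floordiv_step]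
      ring_nf
    show spiralLoopA si (n+1) i seq _ _ = _
    simp only [spiralLoopA, hmod, pvValsFrom, pvCut]
    rw [headI_append_ne _ hne, h0]
    split
    · rfl
    · have hinv : pvCF sj si i = PySem.Int.mod ((i+1)*sj + si * (PySem.Int.floordiv (((i+1)-1)*(i+1)) 2)) 32 := by
        unfold pvCF; norm_num
      have hj : sj + i*si + si = sj + (i+1)*si := by ring
      rw [hinv, hj, ih (i+1) _ (by rw [headI_append_ne _ hne]; exact h0) (by simp)]
      simp

-- ===== VERDICT (by name: the statement is the Claim_ definition above) =====
theorem pattern_progressive_spiral_spec : Claim_equal_pattern_progressive_spiral := by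
  intro sj si _
  show pattern_progressive_spiral sj si = pattern_progressive_spiral_alt sj si
  unfold pattern_progressive_spiral pattern_progressive_spiral_alt
  have h := loop_eq_cut sj si 128 0 [0] rfl (by simp)
  have hr := valsFrom_eq_map_pyRange sj si 128 0
  norm_num at hr
  rw [← hr]
  simpa [PySem.Int.floordiv, PySem.Int.mod] using h
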